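-- pv_equiv track=rewrite | github.com/ttowayo/pxtovw | rebuild_banners.py | extract_main
-- ===== SOURCE A (Python) =====
-- def extract_main(content):
--     start_tag = '<div class="main">'
--     start_idx = content.find(start_tag)
--     if start_idx == -1:
--         return None
--
--     # 카운팅을 통해 <div class="main"> 의 닫는 </div> 찾기
--     i = start_idx
--     div_count = 0
--     while i < len(content):
--         # <div 로 시작하는지 확인 (클래스 무관)
--         if content[i:i+4] == '<div':
--             # <div ...> 인지 확실히 하기 위해 (간단히)
--             div_count += 1
--         elif content[i:i+6] == '</div>':
--             div_count -= 1
--             if div_count == 0: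
--                 end_idx = i + 6
--                 return content[start_idx:end_idx]
--         i += 1
--     return None
-- ===== SOURCE B (Python) =====
-- def _div_tokens(content, start):
--     # ordered (end_index, is_open) events for every '<div' / '</div>' occurrence from `start`,
--     # jumping between '<' characters instead of scanning every position
--     tokens = []
--     i = start
--     while True:
--         j = content.find('<', i)
--         if j == -1:
--             return tokens
--         if content.startswith('</div>', j):
--             tokens.append((j + 6, False))
--             i = j + 6
--         elif content.startswith('<div', j):
--             tokens.append((j + 4, True))
--             i = j + 4
--         else:
--             i = j + 1
--
--
-- def extract_main(content):
--     start_idx = content.find('<div class="main">')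
--     if start_idx == -1:
--         return None
--     depth = 0
--     for end, is_open in _div_tokens(content, start_idx):
--         if is_open:
--             depth += 1
--         else:
--             depth -= 1
--             if depth == 0:
--                 return content[start_idx:end]
--     return None
-- ===== Notes on version B (the rewrite author's own statement) =====
-- stated objective: alternative
-- what changed: Replaces A's per-character slice-comparison scan with a two-phase decomposition: first build the ordered '<div'/'</div>' token stream by jumping from '<' to '<' via str.find and str.startswith, then walk that token list with a depth counter.
import Mathlib
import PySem

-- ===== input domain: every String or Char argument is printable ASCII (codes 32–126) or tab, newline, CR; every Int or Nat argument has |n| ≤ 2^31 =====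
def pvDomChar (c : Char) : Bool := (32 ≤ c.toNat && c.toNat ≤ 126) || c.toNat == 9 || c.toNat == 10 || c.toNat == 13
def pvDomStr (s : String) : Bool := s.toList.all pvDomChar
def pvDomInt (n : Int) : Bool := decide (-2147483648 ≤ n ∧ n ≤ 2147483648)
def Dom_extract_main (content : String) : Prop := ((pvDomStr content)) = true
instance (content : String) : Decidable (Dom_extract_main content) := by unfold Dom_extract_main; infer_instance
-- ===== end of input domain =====

-- B replaces A's per-character depth scan by a two-phase decomposition (build the '<div'/'</div>'
-- token stream by jumping between '<' characters, then walk it with a depth counter): objective 'alternative'.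

-- ===== PORT A =====
-- A's while-loop; content[i:i+4] / content[i:i+6] ported as (cs.drop i).take _ and
-- content[start_idx:i+6] as (cs.take (i+6)).drop start_idx — exact for nonnegative Python
-- slice bounds (both clamp past the end identically).
def pvALoop (cs : List Char) (start_idx : Nat) (i : Nat) (div_count : Int) : Option String :=
  if i < cs.length then
    if (cs.drop i).take 4 = ['<','d','i','v'] then
      pvALoop cs start_idx (i+1) (div_count+1)
    else if (cs.drop i).take 6 = ['<','/','d','i','v','>'] then
      if div_count - 1 = 0 then some (String.ofList ((cs.take (i+6)).drop start_idx))
      else pvALoop cs start_idx (i+1) (div_count-1)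
    else pvALoop cs start_idx (i+1) div_count
  else none
termination_by cs.length - i
decreasing_by all_goals omega

def extract_main (content : String) : Option String :=
  let cs := content.toList
  let start_idx := PySem.Chars.find cs ['<','d','i','v',' ','c','l','a','s','s','=','"','m','a','i','n','"','>']
  if start_idx = -1 then none
  else pvALoop cs start_idx.toNat start_idx.toNat 0

-- ===== PORT B =====
-- content.find('<', i): hand port, exact for the single-character needle '<' and a
-- nonnegative start (returns the first index ≥ i holding '<', none = Python's -1).
def pvFindLt (cs : List Char) (i : Nat) : Option Nat :=
  if h : i < cs.length then
    if cs[i] = '<' then some i else pvFindLt cs (i+1)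
  else none
termination_by cs.length - i
decreasing_by omega

theorem pvFindLt_some (cs : List Char) (i j : Nat) (h : pvFindLt cs i = some j) :
    i ≤ j ∧ j < cs.length := by
  fun_induction pvFindLt cs i with
  | case1 i hi hc => simp only [Option.some.injEq] at h; omega
  | case2 i hi hc ih => have := ih h; omega
  | case3 i hi => simp_all

-- B's token builder: startswith(pat, j) ported as (cs.drop j).take |pat| = pat (exact:
-- Python's startswith with a start offset is the truncating-slice comparison).
def pvBTokens (cs : List Char) (i : Nat) : List (Nat × Bool) :=
  match h : pvFindLt cs i with
  | none => []
  | some j =>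
    if (cs.drop j).take 6 = ['<','/','d','i','v','>'] then (j+6, false) :: pvBTokens cs (j+6)
    else if (cs.drop j).take 4 = ['<','d','i','v'] then (j+4, true) :: pvBTokens cs (j+4)
    else pvBTokens cs (j+1)
termination_by cs.length - i
decreasing_by all_goals (have := pvFindLt_some cs i j h; omega)

-- B's walk over the token stream.
def pvBWalk (cs : List Char) (start_idx : Nat) (depth : Int) : List (Nat × Bool) → Option String
  | [] => none
  | (e, isOpen) :: rest =>
    if isOpen then pvBWalk cs start_idx (depth + 1) rest
    else if depth - 1 = 0 then some (String.ofList ((cs.take e).drop start_idx))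
    else pvBWalk cs start_idx (depth - 1) rest

def extract_main_alt (content : String) : Option String :=
  let cs := content.toList
  let start_idx := PySem.Chars.find cs ['<','d','i','v',' ','c','l','a','s','s','=','"','m','a','i','n','"','>']
  if start_idx = -1 then none
  else pvBWalk cs start_idx.toNat 0 (pvBTokens cs start_idx.toNat)

-- ===== PRECONDITION & SPEC =====
def Spec_extract_main (content : String) (out : Option String) : Prop := out = extract_main_alt content
instance (content : String) (out : Option String) : Decidable (Spec_extract_main content out) := by unfold Spec_extract_main; infer_instance

-- ===== CLAIM (what is proved, stated in full; the proofs are below) =====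
def Claim_equal_extract_main : Prop := ∀ (content : String), Dom_extract_main content → Spec_extract_main content (extract_main content)

-- ===== LEMMAS AND PROOFS =====

theorem pvTake4_shape (l : List Char) (a b c d : Char) (h : l.take 4 = [a,b,c,d]) :
    ∃ t, l = a::b::c::d::t := by
  rcases l with _|⟨x1,_|⟨x2,_|⟨x3,_|⟨x4,t⟩⟩⟩⟩ <;> simp_all

theorem pvTake6_shape (l : List Char) (a b c d e f : Char) (h : l.take 6 = [a,b,c,d,e,f]) :
    ∃ t, l = a::b::c::d::e::f::t := by
  rcases l with _|⟨x1,_|⟨x2,_|⟨x3,_|⟨x4,_|⟨x5,_|⟨x6,t⟩⟩⟩⟩⟩⟩ <;> simp_all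

theorem pvDrop_succ (cs : List Char) (i : Nat) (c : Char) (t : List Char)
    (h : cs.drop i = c :: t) : cs.drop (i+1) = t := by
  have : cs.drop (i+1) = (cs.drop i).drop 1 := by
    rw [← List.drop_drop]
  rw [this, h]; rfl

-- one A-step over a position that does not start with '<' keeps the state
theorem pvALoop_skip (cs : List Char) (s i : Nat) (d : Int) (c : Char) (t : List Char)
    (hd : cs.drop i = c :: t) (hc : c ≠ '<') :
    pvALoop cs s i d = pvALoop cs s (i+1) d := by
  have hi : i < cs.length := by
    by_contra h
    rw [List.drop_eq_nil_of_le (by omega)] at hd; simp at hd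
  rw [pvALoop]
  have h4 : ¬ ((cs.drop i).take 4 = ['<','d','i','v']) := by
    rw [hd]; intro h; simp [List.take] at h; exact hc h.1
  have h6 : ¬ ((cs.drop i).take 6 = ['<','/','d','i','v','>']) := by
    rw [hd]; intro h; simp [List.take] at h; exact hc h.1
  simp [hi, h4, h6]

theorem pvFindLt_skip (cs : List Char) (i : Nat) (hi : i < cs.length) (hc : cs[i] ≠ '<') :
    pvFindLt cs i = pvFindLt cs (i+1) := by
  rw [pvFindLt]; simp [hi, hc]

theorem pvFindLt_hit (cs : List Char) (i : Nat) (hi : i < cs.length) (hc : cs[i] = '<') :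
    pvFindLt cs i = some i := by
  rw [pvFindLt]; simp [hi, hc]

theorem pvBTokens_congr (cs : List Char) (i i' : Nat)
    (h : pvFindLt cs i = pvFindLt cs i') : pvBTokens cs i = pvBTokens cs i' := by
  rw [pvBTokens, pvBTokens, h]

-- at a position with neither token, B's builder moves one step right
theorem pvBTokens_step (cs : List Char) (i : Nat) (hi : i < cs.length)
    (h4 : ¬ ((cs.drop i).take 4 = ['<','d','i','v']))
    (h6 : ¬ ((cs.drop i).take 6 = ['<','/','d','i','v','>'])) :
    pvBTokens cs i = pvBTokens cs (i+1) := by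
  by_cases hc : cs[i] = '<'
  · rw [pvBTokens, pvFindLt_hit cs i hi hc]
    simp [h4, h6]
  · exact pvBTokens_congr cs i (i+1) (pvFindLt_skip cs i hi hc)

theorem pvGet_of_drop (cs : List Char) (i : Nat) (c : Char) (t : List Char)
    (h : cs.drop i = c :: t) (hi : i < cs.length) : cs[i] = c := by
  have h0 : (cs.drop i)[0]'(by simp [h]) = c := by simp [h]
  rw [List.getElem_drop] at h0
  simpa using h0

-- main invariant: A's scan from i equals B's walk of the token stream from i
theorem pvMain (cs : List Char) (k : Nat) :
    ∀ i, cs.length - i ≤ k → ∀ s d,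
      pvALoop cs s i d = pvBWalk cs s d (pvBTokens cs i) := by
  induction k with
  | zero =>
    intro i hk s d
    have hi : ¬ i < cs.length := by omega
    have hf : pvFindLt cs i = none := by rw [pvFindLt]; simp [hi]
    have hb : pvBTokens cs i = [] := by rw [pvBTokens, hf]
    rw [pvALoop, hb]
    simp [hi, pvBWalk]
  | succ k ih =>
    intro i hk s d
    by_cases hi : i < cs.length
    · by_cases h4 : (cs.drop i).take 4 = ['<','d','i','v']
      · -- '<div' token
        obtain ⟨t, ht⟩ := pvTake4_shape _ _ _ _ _ h4
        have e1 := pvDrop_succ cs i _ _ ht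
        have e2 := pvDrop_succ cs (i+1) _ _ e1
        have e3 := pvDrop_succ cs (i+2) _ _ e2
        have hc : cs[i] = '<' := pvGet_of_drop cs i _ _ ht hi
        have hlen : i + 4 ≤ cs.length := by
          have := congrArg List.length ht; simp at this; omega
        -- A side: four steps, the last three over 'd','i','v'
        have ha : pvALoop cs s i d = pvALoop cs s (i+4) (d+1) := by
          rw [pvALoop]; simp [hi, h4]
          rw [pvALoop_skip cs s (i+1) _ 'd' _ e1 (by decide),
              pvALoop_skip cs s (i+2) _ 'i' _ e2 (by decide),
              pvALoop_skip cs s (i+3) _ 'v' _ e3 (by decide)]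
        -- B side: one open token
        have h6 : ¬ ((cs.drop i).take 6 = ['<','/','d','i','v','>']) := by
          rw [ht]; intro h; simp [List.take] at h
        have hb : pvBTokens cs i = (i+4, true) :: pvBTokens cs (i+4) := by
          rw [pvBTokens, pvFindLt_hit cs i hi hc]; simp [h4, h6]
        rw [ha, hb, pvBWalk]
        exact ih (i+4) (by omega) s (d+1)
      · by_cases h6 : (cs.drop i).take 6 = ['<','/','d','i','v','>']
        · -- '</div>' token
          obtain ⟨t, ht⟩ := pvTake6_shape _ _ _ _ _ _ _ h6
          have e1 := pvDrop_succ cs i _ _ ht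
          have e2 := pvDrop_succ cs (i+1) _ _ e1
          have e3 := pvDrop_succ cs (i+2) _ _ e2
          have e4 := pvDrop_succ cs (i+3) _ _ e3
          have e5 := pvDrop_succ cs (i+4) _ _ e4
          have hc : cs[i] = '<' := pvGet_of_drop cs i _ _ ht hi
          have hb : pvBTokens cs i = (i+6, false) :: pvBTokens cs (i+6) := by
            rw [pvBTokens, pvFindLt_hit cs i hi hc]; simp [h6]
          rw [hb, pvBWalk]
          by_cases hd : d - 1 = 0
          · rw [pvALoop]; simp [hi, h4, h6, hd]
          · have ha : pvALoop cs s i d = pvALoop cs s (i+6) (d-1) := by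
              rw [pvALoop]; simp [hi, h4, h6, hd]
              rw [pvALoop_skip cs s (i+1) _ '/' _ e1 (by decide),
                  pvALoop_skip cs s (i+2) _ 'd' _ e2 (by decide),
                  pvALoop_skip cs s (i+3) _ 'i' _ e3 (by decide),
                  pvALoop_skip cs s (i+4) _ 'v' _ e4 (by decide),
                  pvALoop_skip cs s (i+5) _ '>' _ e5 (by decide)]
            rw [ha, if_neg (show ¬(false = true) by decide), if_neg hd]
            exact ih (i+6) (by omega) s (d-1)
        · -- no token here
          have ha : pvALoop cs s i d = pvALoop cs s (i+1) d := by
            rw [pvALoop]; simp [hi, h4, h6]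
          rw [ha, pvBTokens_step cs i hi h4 h6]
          exact ih (i+1) (by omega) s d
    · have hf : pvFindLt cs i = none := by rw [pvFindLt]; simp [hi]
      have hb : pvBTokens cs i = [] := by rw [pvBTokens, hf]
      rw [pvALoop, hb]
      simp [hi, pvBWalk]

-- ===== VERDICT (by name: the statement is the Claim_ definition above) =====
theorem extract_main_spec : Claim_equal_extract_main := by
  intro content _
  unfold Spec_extract_main extract_main extract_main_alt
  simp only
  by_cases h : PySem.Chars.find content.toList ['<','d','i','v',' ','c','l','a','s','s','=','"','m','a','i','n','"','>'] = -1
  · simp [h]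
  · simp [h]
    exact pvMain content.toList _ _ (le_refl _) _ 0
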